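-- pv_equiv track=rewrite | github.com/nymtech/nym | lib-25519/lib25519/crypto_mGnP/ed25519/ref10/point26.py | hassmallrelation
-- ===== SOURCE A (Python) =====
-- q = 2**255 - 19
--
-- def expmod(b,e,m):
--   if e == 0: return 1
--   t = expmod(b,e//2,m)**2 % m
--   if e & 1: t = (t*b) % m
--   return t
--
-- def inv(x):
--   return expmod(x,q-2,q)
--
-- d = -121665 * inv(121666)
--
-- def edwards(P,Q):
--   x1,y1 = P
--   x2,y2 = Q
--   x3 = (x1*y2+x2*y1) * inv(1+d*x1*x2*y1*y2)
--   y3 = (y1*y2+x1*x2) * inv(1-d*x1*x2*y1*y2)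
--   return x3%q,y3%q
--
-- def hassmallrelation(A,B):
--   jAyset = set()
--   jA = 0,1
--   for j in range(1,1000):
--     jA = edwards(jA,A)
--     jAyset.add(jA[1])
--   jB = 0,1
--   for j in range(1,1000):
--     jB = edwards(jB,B)
--     if jB[1] in jAyset: return True
--   return False
-- ===== SOURCE B (Python) =====
-- # Same relation test, but: inversion is an iterative MSB-first square-and-multiply
-- # over the precomputed bit string of q-2 (instead of A's recursive halving), each
-- # orbit's 999 y-coordinates are produced once as a list, and the intersection test
-- # sorts both lists and runs a two-pointer merge instead of a hash set with an
-- # early-return membership scan.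
-- q = 2**255 - 19
--
-- _E_BITS = [int(c) for c in bin(q - 2)[2:]]  # MSB-first bits of the Fermat exponent
--
-- def _inv(x):
--     r = 1
--     for bit in _E_BITS:
--         r = r * r % q
--         if bit:
--             r = r * x % q
--     return r
--
-- d = -121665 * _inv(121666)
--
-- def _orbit(P):
--     x2, y2 = P
--     x, y = 0, 1
--     ys = []
--     for _ in range(999):
--         t = d * x * x2 * y * y2
--         x, y = (x * y2 + x2 * y) * _inv(1 + t) % q, (y * y2 + x * x2) * _inv(1 - t) % q
--         ys.append(y)
--     return ys
--
-- def hassmallrelation(A, B):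
--     sa = sorted(_orbit(A))
--     sb = sorted(_orbit(B))
--     i = j = 0
--     while i < len(sa) and j < len(sb):
--         if sa[i] < sb[j]:
--             i += 1
--         elif sa[i] > sb[j]:
--             j += 1
--         else:
--             return True
--     return False
-- ===== Notes on version B (the rewrite author's own statement) =====
-- stated objective: alternative
-- what changed: Inversion is an iterative MSB-first square-and-multiply over the precomputed bit list of q-2 instead of A's recursive halving expmod, each orbit's 999 y-coordinates are built once as a plain list, and the relation test sorts both lists and detects a common element with a two-pointer merge instead of A's incremental hash set plus early-return membership scan.
import Mathlib
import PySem

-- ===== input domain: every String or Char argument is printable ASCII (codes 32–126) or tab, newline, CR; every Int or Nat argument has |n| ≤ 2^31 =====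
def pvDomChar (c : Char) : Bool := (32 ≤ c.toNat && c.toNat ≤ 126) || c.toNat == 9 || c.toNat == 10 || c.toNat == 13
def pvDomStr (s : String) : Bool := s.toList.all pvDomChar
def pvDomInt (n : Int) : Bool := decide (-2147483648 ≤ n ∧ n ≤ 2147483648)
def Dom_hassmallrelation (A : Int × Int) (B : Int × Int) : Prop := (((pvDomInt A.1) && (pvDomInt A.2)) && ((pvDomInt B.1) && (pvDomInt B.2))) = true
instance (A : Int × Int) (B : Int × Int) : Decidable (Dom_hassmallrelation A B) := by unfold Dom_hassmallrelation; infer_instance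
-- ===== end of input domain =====

-- B replaces A's recursive expmod by an iterative MSB-first square-and-multiply over
-- the precomputed bit list of q-2, builds each orbit's 999 y-coordinates once as a
-- list, and answers by sorting both lists and a two-pointer merge instead of an
-- incremental set with an early-return membership scan (alternative, not faster).

-- ===== PORT A =====
def pvQ : Int := 2^255 - 19

-- port of expmod.  Python's `if e == 0: return 1` only terminates for e ≥ 0
-- (for e < 0 the recursion e//2 never reaches 0 and Python raises RecursionError);
-- the guard `e ≤ 0` makes the port total, returning 1 on the never-called e < 0.
def expmod (b : Int) (e : Int) (m : Int) : Int :=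
  if e ≤ 0 then 1
  else
    let t := PySem.Int.mod ((expmod b (PySem.Int.floordiv e 2) m) ^ 2) m
    if PySem.Int.band e 1 ≠ 0 then PySem.Int.mod (t * b) m else t
termination_by e.toNat
decreasing_by
  have h2 : PySem.Int.floordiv e 2 = e / 2 := PySem.Int.floordiv_eq_ediv_of_pos (by norm_num)
  rw [h2]; omega

def inv (x : Int) : Int := expmod x (pvQ - 2) pvQ

def pvD : Int := -121665 * inv 121666

def edwards (P : Int × Int) (Q : Int × Int) : Int × Int :=
  let x1 := P.1; let y1 := P.2
  let x2 := Q.1; let y2 := Q.2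
  let x3 := (x1*y2 + x2*y1) * inv (1 + pvD*x1*x2*y1*y2)
  let y3 := (y1*y2 + x1*x2) * inv (1 - pvD*x1*x2*y1*y2)
  (PySem.Int.mod x3 pvQ, PySem.Int.mod y3 pvQ)

def hassmallrelation (A : Int × Int) (B : Int × Int) : Bool :=
  let fst := (PySem.List.pyRange 1 1000 1).foldl
    (fun (st : PySem.Set Int × (Int × Int)) _ =>
      let jA := edwards st.2 A
      (st.1.add jA.2, jA))
    (PySem.Set.empty, (0, 1))
  -- early `return True` encoded as a sticky Bool in the fold state
  let snd := (PySem.List.pyRange 1 1000 1).foldl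
    (fun (st : Bool × (Int × Int)) _ =>
      if st.1 then st
      else
        let jB := edwards st.2 B
        (fst.1.contains jB.2, jB))
    (false, (0, 1))
  snd.1

-- ===== PORT B =====
def qAlt : Int := 2^255 - 19

-- [int(c) for c in bin(n)[2:]] for n > 0: MSB-first binary digits
def pvBitsMSB (n : Nat) : List Int :=
  if n = 0 then [] else pvBitsMSB (n / 2) ++ [((n % 2 : Nat) : Int)]
termination_by n
decreasing_by omega

-- _E_BITS: bits of q - 2 = 2^255 - 21
def eBits : List Int := pvBitsMSB (2^255 - 21)

-- _inv: iterative MSB-first square-and-multiply (Python truthiness `if bit:` = bit ≠ 0)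
def invAlt (x : Int) : Int :=
  eBits.foldl
    (fun r bit =>
      let r := PySem.Int.mod (r * r) qAlt
      if bit ≠ 0 then PySem.Int.mod (r * x) qAlt else r) 1

def dAlt : Int := -121665 * invAlt 121666

def orbitYs (P : Int × Int) : List Int :=
  ((PySem.List.pyRange 0 999 1).foldl
    (fun (st : (Int × Int) × List Int) _ =>
      let t := dAlt * st.1.1 * P.1 * st.1.2 * P.2
      let x' := PySem.Int.mod ((st.1.1 * P.2 + P.1 * st.1.2) * invAlt (1 + t)) qAlt
      let y' := PySem.Int.mod ((st.1.2 * P.2 + st.1.1 * P.1) * invAlt (1 - t)) qAlt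
      ((x', y'), st.2 ++ [y']))
    ((0, 1), [])).2

-- the two-pointer while loop over the sorted lists, as structural recursion
def mergeHas : List Int → List Int → Bool
  | [], _ => false
  | _ :: _, [] => false
  | a :: as, b :: bs =>
      if a < b then mergeHas as (b :: bs)
      else if b < a then mergeHas (a :: as) bs
      else true
termination_by l1 l2 => l1.length + l2.length

def hassmallrelation_alt (A : Int × Int) (B : Int × Int) : Bool :=
  mergeHas (PySem.List.sorted (orbitYs A) (fun x => x) false)
           (PySem.List.sorted (orbitYs B) (fun x => x) false)

-- ===== PRECONDITION & SPEC =====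
def Spec_hassmallrelation (A : Int × Int) (B : Int × Int) (out : Bool) : Prop := out = hassmallrelation_alt A B
instance (A : Int × Int) (B : Int × Int) (out : Bool) : Decidable (Spec_hassmallrelation A B out) := by unfold Spec_hassmallrelation; infer_instance

-- ===== CLAIM =====
def Claim_equal_hassmallrelation : Prop := ∀ (A : Int × Int) (B : Int × Int), Dom_hassmallrelation A B → Spec_hassmallrelation A B (hassmallrelation A B)

-- ===== LEMMAS AND PROOFS =====

theorem pvQ_pos : (0:Int) < pvQ := by norm_num [pvQ]

theorem qAlt_eq : qAlt = pvQ := rfl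

theorem emod_mul_left (a b n : Int) : (a % n * b) % n = a * b % n :=
  Int.ModEq.mul (Int.emod_emod_of_dvd a dvd_rfl) (Int.ModEq.refl b)

theorem emod_pow (a n : Int) (k : Nat) : (a % n) ^ k % n = a ^ k % n :=
  Int.ModEq.pow k (Int.emod_emod_of_dvd a dvd_rfl)

theorem one_emod_pvQ : (1:Int) % pvQ = 1 := by
  rw [Int.emod_eq_of_lt (by norm_num) (by norm_num [pvQ])]

theorem expmod_eq_pow : ∀ (n : Nat) (b e : Int), 0 ≤ e → e.toNat = n →
    expmod b e pvQ = (b ^ e.toNat) % pvQ := by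
  intro n
  induction n using Nat.strong_induction_on with
  | _ n ih =>
    intro b e he hn
    rw [expmod]
    by_cases h0 : e ≤ 0
    · have he0 : e = 0 := le_antisymm h0 he
      subst he0
      simp [one_emod_pvQ]
    · have hepos : 0 < e := lt_of_not_ge h0
      have hfd : PySem.Int.floordiv e 2 = e / 2 := PySem.Int.floordiv_eq_ediv_of_pos (by norm_num)
      have hrec := ih (e / 2).toNat (by omega) b (e / 2) (by omega) rfl
      rw [if_neg h0, hfd, hrec, PySem.Int.band_one]
      simp only [PySem.Int.mod_eq_emod_of_pos (b := 2) (by norm_num : (0:Int) < 2),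
        PySem.Int.mod_eq_emod_of_pos pvQ_pos]
      have hsq : ((b ^ (e / 2).toNat % pvQ) ^ 2) % pvQ = (b ^ (2 * (e / 2).toNat)) % pvQ := by
        rw [emod_pow, ← pow_mul, Nat.mul_comm]
      by_cases hodd : e % 2 = 0
      · rw [if_neg (by simp [hodd]), hsq]
        have : e.toNat = 2 * (e / 2).toNat := by omega
        rw [this]
      · rw [if_pos (by omega), hsq, emod_mul_left]
        have : e.toNat = 2 * (e / 2).toNat + 1 := by omega
        rw [this, pow_succ]

theorem emod_mul_emod (a b n : Int) : (a % n) * (b % n) % n = a * b % n :=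
  Int.ModEq.mul (Int.emod_emod_of_dvd a dvd_rfl) (Int.emod_emod_of_dvd b dvd_rfl)

-- the square-and-multiply fold over the MSB-first bits computes acc^(2^len) * x^n mod q
theorem foldBits (x : Int) : ∀ (n : Nat) (acc : Int), acc % pvQ = acc →
    (pvBitsMSB n).foldl
      (fun r bit =>
        let r := PySem.Int.mod (r * r) qAlt
        if bit ≠ 0 then PySem.Int.mod (r * x) qAlt else r) acc
    = (acc ^ (2 ^ (pvBitsMSB n).length) * x ^ n) % pvQ := by
  intro n
  induction n using Nat.strong_induction_on with
  | _ n ih =>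
    intro acc hacc
    by_cases hn : n = 0
    · subst hn
      rw [pvBitsMSB, if_pos rfl]
      simp [hacc]
    · rw [pvBitsMSB, if_neg hn, List.foldl_append]
      simp only [List.foldl_cons, List.foldl_nil, List.length_append, List.length_cons,
        List.length_nil, Nat.zero_add]
      rw [ih (n / 2) (by omega) acc hacc]
      simp only [qAlt_eq, PySem.Int.mod_eq_emod_of_pos pvQ_pos]
      set L := (pvBitsMSB (n / 2)).length with hL
      set Y := acc ^ 2 ^ L * x ^ (n / 2) with hY
      by_cases hodd : n % 2 = 0
      · rw [if_neg (by simp [hodd]), emod_mul_emod]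
        have key : Y * Y = acc ^ 2 ^ (L + 1) * x ^ n := by
          have hn2 : n = n / 2 + n / 2 := by omega
          rw [hY, pow_succ, pow_mul]
          conv_rhs => rw [hn2]
          rw [pow_add]
          ring
        rw [key]
      · have hb : ((n % 2 : Nat) : Int) ≠ 0 := by omega
        rw [if_pos hb, emod_mul_emod, emod_mul_left]
        have key : Y * Y * x = acc ^ 2 ^ (L + 1) * x ^ n := by
          have hn2 : n = n / 2 + n / 2 + 1 := by omega
          rw [hY, pow_succ, pow_mul]
          conv_rhs => rw [hn2]
          rw [pow_add, pow_add, pow_one]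
          ring
        rw [key]

theorem invAlt_eq_pow (x : Int) : invAlt x = (x ^ (2^255 - 21 : Nat)) % pvQ := by
  rw [invAlt, eBits, foldBits x (2^255 - 21) 1 one_emod_pvQ, one_pow, one_mul]

theorem toNat_q_sub_two : (pvQ - 2).toNat = 2^255 - 21 := by norm_num [pvQ]; rfl

theorem inv_eq (x : Int) : inv x = invAlt x := by
  rw [inv, expmod_eq_pow (pvQ - 2).toNat x (pvQ - 2) (by norm_num [pvQ]) rfl,
    invAlt_eq_pow, toNat_q_sub_two]

theorem d_eq : pvD = dAlt := by
  rw [pvD, dAlt, inv_eq]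

-- the y-coordinates of s+P, s+2P, …, s+nP
def ysFrom (P : Int × Int) : Nat → (Int × Int) → List Int
  | 0, _ => []
  | n+1, s => (edwards s P).2 :: ysFrom P n (edwards s P)

theorem edwards_eq_altstep (s P : Int × Int) :
    edwards s P =
      (PySem.Int.mod ((s.1 * P.2 + P.1 * s.2) * invAlt (1 + dAlt * s.1 * P.1 * s.2 * P.2)) qAlt,
       PySem.Int.mod ((s.2 * P.2 + s.1 * P.1) * invAlt (1 - dAlt * s.1 * P.1 * s.2 * P.2)) qAlt) := by
  simp only [edwards, inv_eq, d_eq, qAlt_eq]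

theorem foldB (P : Int × Int) : ∀ (l : List Int) (s : Int × Int) (acc : List Int),
    (l.foldl (fun (st : (Int × Int) × List Int) _ =>
        (edwards st.1 P, st.2 ++ [(edwards st.1 P).2])) (s, acc)).2
      = acc ++ ysFrom P l.length s := by
  intro l
  induction l with
  | nil => intro s acc; simp [ysFrom]
  | cons x l ih =>
    intro s acc
    simp only [List.foldl_cons, List.length_cons, ysFrom, ih]
    simp

theorem orbitYs_eq (P : Int × Int) : orbitYs P = ysFrom P 999 (0, 1) := by
  have hf : (fun (st : (Int × Int) × List Int) (_ : Int) =>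
      let t := dAlt * st.1.1 * P.1 * st.1.2 * P.2
      let x' := PySem.Int.mod ((st.1.1 * P.2 + P.1 * st.1.2) * invAlt (1 + t)) qAlt
      let y' := PySem.Int.mod ((st.1.2 * P.2 + st.1.1 * P.1) * invAlt (1 - t)) qAlt
      ((x', y'), st.2 ++ [y']))
      = (fun (st : (Int × Int) × List Int) _ =>
        (edwards st.1 P, st.2 ++ [(edwards st.1 P).2])) := by
    funext st i
    rw [edwards_eq_altstep st.1 P]
  have hl : (PySem.List.pyRange 0 999 1).length = 999 := by
    rw [PySem.List.length_pyRange_one]; rfl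
  rw [orbitYs, hf, foldB, hl]
  simp

theorem foldA_mem (P : Int × Int) : ∀ (l : List Int) (S : PySem.Set Int) (s : Int × Int) (y : Int),
    (y ∈ (l.foldl (fun (st : PySem.Set Int × (Int × Int)) _ =>
            (st.1.add (edwards st.2 P).2, edwards st.2 P)) (S, s)).1)
      ↔ y ∈ S ∨ y ∈ ysFrom P l.length s := by
  intro l
  induction l with
  | nil => intro S s y; simp [ysFrom]
  | cons x l ih =>
    intro S s y
    simp only [List.foldl_cons, List.length_cons, ysFrom, ih, PySem.Set.mem_add, List.mem_cons]
    tauto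

theorem foldE_true (P : Int × Int) (S : PySem.Set Int) : ∀ (l : List Int) (s : Int × Int),
    (l.foldl (fun (st : Bool × (Int × Int)) _ =>
        if st.1 then st else (S.contains (edwards st.2 P).2, edwards st.2 P)) (true, s)).1 = true := by
  intro l
  induction l with
  | nil => intro s; rfl
  | cons x l ih => intro s; simpa using ih s

theorem foldE_spec (P : Int × Int) (S : PySem.Set Int) : ∀ (l : List Int) (s : Int × Int),
    (l.foldl (fun (st : Bool × (Int × Int)) _ =>
        if st.1 then st else (S.contains (edwards st.2 P).2, edwards st.2 P)) (false, s)).1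
      = (ysFrom P l.length s).any (fun y => S.contains y) := by
  intro l
  induction l with
  | nil => intro s; rfl
  | cons x l ih =>
    intro s
    simp only [List.foldl_cons, List.length_cons, ysFrom, List.any_cons, if_neg Bool.false_ne_true]
    cases h : S.contains (edwards s P).2 with
    | true => rw [Bool.true_or]; exact foldE_true P S l _
    | false => rw [Bool.false_or]; exact ih _

theorem pyRange_len : (PySem.List.pyRange 1 1000 1).length = 999 := by
  rw [PySem.List.length_pyRange_one]; rfl

-- two-pointer merge on sorted lists detects exactly a common element
theorem mergeHas_iff : ∀ (l1 l2 : List Int), l1.Pairwise (· ≤ ·) → l2.Pairwise (· ≤ ·) →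
    (mergeHas l1 l2 = true ↔ ∃ y, y ∈ l1 ∧ y ∈ l2) := by
  intro l1 l2
  induction l1, l2 using mergeHas.induct with
  | case1 l2 => simp [mergeHas]
  | case2 a as => simp [mergeHas]
  | case3 a as b bs hab ih =>
    intro h1 h2
    rw [mergeHas, if_pos hab]
    rw [ih (List.Pairwise.of_cons h1) h2]
    constructor
    · rintro ⟨y, hy1, hy2⟩
      exact ⟨y, List.mem_cons_of_mem a hy1, hy2⟩
    · rintro ⟨y, hy1, hy2⟩
      rcases List.mem_cons.mp hy1 with rfl | hy1'
      · rcases List.mem_cons.mp hy2 with rfl | hy2'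
        · omega
        · have := (List.pairwise_cons.mp h2).1 y hy2'
          omega
      · exact ⟨y, hy1', hy2⟩
  | case4 a as b bs hab hba ih =>
    intro h1 h2
    rw [mergeHas, if_neg hab, if_pos hba]
    rw [ih h1 (List.Pairwise.of_cons h2)]
    constructor
    · rintro ⟨y, hy1, hy2⟩
      exact ⟨y, hy1, List.mem_cons_of_mem b hy2⟩
    · rintro ⟨y, hy1, hy2⟩
      rcases List.mem_cons.mp hy2 with rfl | hy2'
      · rcases List.mem_cons.mp hy1 with rfl | hy1'
        · omega
        · have := (List.pairwise_cons.mp h1).1 y hy1'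
          omega
      · exact ⟨y, hy1, hy2'⟩
  | case5 a as b bs hab hba =>
    intro _ _
    rw [mergeHas, if_neg hab, if_neg hba]
    have : a = b := by omega
    subst this
    simp only [true_iff]
    exact ⟨a, List.mem_cons_self, List.mem_cons_self⟩

-- ===== VERDICT =====
theorem hassmallrelation_spec : Claim_equal_hassmallrelation := by
  intro a b _
  unfold Spec_hassmallrelation hassmallrelation hassmallrelation_alt
  rw [Bool.eq_iff_iff]
  rw [mergeHas_iff _ _ (PySem.List.sorted_pairwise _ _) (PySem.List.sorted_pairwise _ _)]
  simp only [foldE_spec, pyRange_len, PySem.List.mem_sorted, orbitYs_eq]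
  simp only [List.any_eq_true, PySem.Set.contains_eq_decide, decide_eq_true_eq, foldA_mem,
    pyRange_len]
  constructor
  · rintro ⟨y, hyB, (h | h)⟩
    · exact absurd h (by simp [PySem.Set.empty])
    · exact ⟨y, h, hyB⟩
  · rintro ⟨y, hyA, hyB⟩
    exact ⟨y, hyB, Or.inr hyA⟩
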